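-- pv_equiv track=rewrite | github.com/TedSinger/hyooze | hyooze.py | brightness_group_to_rows
-- ===== SOURCE A (Python) =====
-- def color_to_td_pair(color):
--     td = '''<td style='color: {fg}; background-color: {bg}; text-rendering: optimizeLegibility; line-height:0; margin:0; font-weight: bold; font-size: x-large; font-family: monospace;'>{text}</td>'''
--     return td.format(fg=color, bg='#f4f5f4', text=color) + td.format(fg="#000000", bg=color, text=color)
--
-- def brightness_group_to_rows(brightness):
--     ret = ''
--
--     nRows = max([len(chroma) for chroma in brightness])
--     for i in range(nRows):
--         pairs = [color_to_td_pair(chroma[i]) if i < len(chroma) else "<td style='background-color: #ffffff'/>"*2 for chroma in brightness]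
--         tds = ''.join(pairs)
--         ret += f'''<tr>{tds}</tr>'''
--     return ret
-- ===== SOURCE B (Python) =====
-- def color_to_td_pair(color):
--     td = '''<td style='color: {fg}; background-color: {bg}; text-rendering: optimizeLegibility; line-height:0; margin:0; font-weight: bold; font-size: x-large; font-family: monospace;'>{text}</td>'''
--     return td.format(fg=color, bg='#f4f5f4', text=color) + td.format(fg="#000000", bg=color, text=color)
--
-- def brightness_group_to_rows(brightness):
--     # Transpose the ragged grid with one iterator per column: each round pulls
--     # the next entry of every column (None when exhausted) and emits one <tr>,
--     # until every column is exhausted; no row count or index arithmetic needed.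
--     blank = "<td style='background-color: #ffffff'/>" * 2
--     its = [iter(chroma) for chroma in brightness]
--     ret = ''
--     while True:
--         row = [next(it, None) for it in its]
--         if all(x is None for x in row):
--             break
--         cells = ''.join(blank if x is None else color_to_td_pair(x) for x in row)
--         ret += '<tr>' + cells + '</tr>'
--     return ret
-- ===== Notes on version B (the rewrite author's own statement) =====
-- stated objective: alternative
-- what changed: Instead of computing max(len) and indexing every column at each row index i, B transposes the ragged grid with one iterator per column, pulling the next entry of each column per emitted row until all columns are exhausted, with no row count or index arithmetic; as a side effect B returns '' on an empty column list where A raises.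
-- crash fix: On brightness = [] A raises ValueError (max of empty sequence) while B returns ''. — e.g. on brightness_group_to_rows([]): A raises ValueError, B returns ""
import Mathlib
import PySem

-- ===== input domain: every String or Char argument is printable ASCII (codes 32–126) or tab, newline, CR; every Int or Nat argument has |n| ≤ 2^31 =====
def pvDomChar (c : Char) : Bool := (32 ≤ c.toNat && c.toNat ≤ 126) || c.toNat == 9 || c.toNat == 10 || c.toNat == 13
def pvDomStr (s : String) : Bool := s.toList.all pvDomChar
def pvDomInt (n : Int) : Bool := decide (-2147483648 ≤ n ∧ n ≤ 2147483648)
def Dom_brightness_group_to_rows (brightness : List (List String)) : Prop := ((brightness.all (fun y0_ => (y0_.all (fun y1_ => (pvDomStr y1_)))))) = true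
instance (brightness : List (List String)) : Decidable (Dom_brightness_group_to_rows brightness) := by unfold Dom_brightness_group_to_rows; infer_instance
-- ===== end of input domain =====

-- B replaces A's max-length/row-index loop by head-stripping transposition of the columns
-- (an alternative decomposition, not claimed faster); where A raises on an empty column
-- list, B returns ''.


-- ===== PORT A =====
-- the td template, with the three format holes filled in
def pvTd (fg bg text : String) : String :=
  "<td style='color: " ++ fg ++ "; background-color: " ++ bg ++ "; text-rendering: optimizeLegibility; line-height:0; margin:0; font-weight: bold; font-size: x-large; font-family: monospace;'>" ++ text ++ "</td>"

def color_to_td_pair (color : String) : String :=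
  pvTd color "#f4f5f4" color ++ pvTd "#000000" color color

-- "<td style='background-color: #ffffff'/>" * 2
def pvBlankPair : String :=
  "<td style='background-color: #ffffff'/>" ++ "<td style='background-color: #ffffff'/>"

def brightness_group_to_rows (brightness : List (List String)) : String :=
  match PySem.List.max? (brightness.map (fun chroma => PySem.List.len chroma)) (fun y => y) with
  | none => ""   -- Python raises ValueError here (max of empty sequence); excluded by Pre_
  | some nRows =>
    (PySem.List.pyRange 0 nRows 1).foldl (fun ret i =>
      let pairs := brightness.map (fun chroma =>
        if i < PySem.List.len chroma then color_to_td_pair ((PySem.List.pyGet? chroma i).getD "")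
        else pvBlankPair)
      let tds := PySem.Str.join "" pairs
      ret ++ ("<tr>" ++ tds ++ "</tr>")) ""

-- ===== PORT B =====
-- termination measure for the while loop: total number of remaining entries
lemma pv_sum_tail_lt (cols : List (List String))
    (h : ¬ (cols.all (fun c => c.length == 0)) = true) :
    ((cols.map List.tail).map List.length).sum < (cols.map List.length).sum := by
  induction cols with
  | nil => simp at h
  | cons c t ih =>
    by_cases hc : c.length = 0
    · have ht : ¬ (t.all (fun c => c.length == 0)) = true := by
        intro hall; exact h (by simp [List.all_cons, hc, hall])
      have := ih ht
      simp only [List.map_cons, List.sum_cons, List.length_tail]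
      omega
    · have hle : ((t.map List.tail).map List.length).sum ≤ (t.map List.length).sum := by
        clear h ih; induction t with
        | nil => simp
        | cons d s ihs => simp only [List.map_cons, List.sum_cons, List.length_tail]; omega
      simp only [List.map_cons, List.sum_cons, List.length_tail]
      omega

-- heads of the column iterators = List.head? of the remaining suffixes
lemma pv_allnone (cols : List (List String)) :
    ((cols.map List.head?).all (fun x => x.isNone)) = (cols.all (fun c => c.length == 0)) := by
  induction cols with
  | nil => rfl
  | cons c t ih => rcases c with _ | ⟨x, cs⟩ <;> simp [ih]

-- row = [next(it, None) for it in its] is recomputed in the else-branch (same pure value)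
def pvLoopB (its : List (List String)) (ret : String) : String :=
  if (its.map List.head?).all (fun x => x.isNone) then ret
  else
    let cells := PySem.Str.join "" ((its.map List.head?).map (fun x =>
      match x with
      | none => pvBlankPair
      | some color => color_to_td_pair color))
    pvLoopB (its.map List.tail) (ret ++ ("<tr>" ++ cells ++ "</tr>"))
termination_by (its.map List.length).sum
decreasing_by
  rename_i h
  simp only [List.map_attach_eq_pmap, List.pmap_eq_map] at h
  simpa using pv_sum_tail_lt its (fun hc => h (by rw [pv_allnone]; exact hc))

def brightness_group_to_rows_alt (brightness : List (List String)) : String :=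
  pvLoopB brightness ""

-- ===== PRECONDITION & SPEC =====
-- Pre_ excludes only the empty column list, on which Python's max([]) raises ValueError.
def Pre_brightness_group_to_rows (brightness : List (List String)) : Prop := brightness ≠ []
instance (brightness : List (List String)) : Decidable (Pre_brightness_group_to_rows brightness) := by unfold Pre_brightness_group_to_rows; infer_instance
def pvWitness_brightness_group_to_rows : List (List String) := [["#a01234"], []]

-- On brightness = [] A raises ValueError (max of empty sequence) while B returns ''.
def Raises_brightness_group_to_rows (brightness : List (List String)) : Prop := brightness = []
instance (brightness : List (List String)) : Decidable (Raises_brightness_group_to_rows brightness) := by unfold Raises_brightness_group_to_rows; infer_instance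
def pvRaiseWitness_brightness_group_to_rows : List (List String) := []
def pvRaiseWitnessOut_brightness_group_to_rows : String := ""

def Spec_brightness_group_to_rows (brightness : List (List String)) (out : String) : Prop := out = brightness_group_to_rows_alt brightness
instance (brightness : List (List String)) (out : String) : Decidable (Spec_brightness_group_to_rows brightness out) := by unfold Spec_brightness_group_to_rows; infer_instance

-- ===== CLAIM (what is proved, stated in full; the proofs are below) =====
def Claim_equal_brightness_group_to_rows : Prop := ∀ (brightness : List (List String)), Dom_brightness_group_to_rows brightness → Pre_brightness_group_to_rows brightness → Spec_brightness_group_to_rows brightness (brightness_group_to_rows brightness)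
def Claim_raises_brightness_group_to_rows : Prop := (∀ (brightness : List (List String)), Dom_brightness_group_to_rows brightness → Raises_brightness_group_to_rows brightness → ¬ Pre_brightness_group_to_rows brightness) ∧ (Dom_brightness_group_to_rows (pvRaiseWitness_brightness_group_to_rows) ∧ Raises_brightness_group_to_rows (pvRaiseWitness_brightness_group_to_rows) ∧ brightness_group_to_rows_alt (pvRaiseWitness_brightness_group_to_rows) = pvRaiseWitnessOut_brightness_group_to_rows)

-- ===== LEMMAS AND PROOFS =====
-- the cell emitted for column c in row i, and the common row/grid description
def pvCell (i : Nat) (col : List String) : String :=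
  if i < col.length then color_to_td_pair ((col[i]?).getD "") else pvBlankPair

def pvRowStr (cols : List (List String)) (i : Nat) : String :=
  "<tr>" ++ PySem.Str.join "" (cols.map (pvCell i)) ++ "</tr>"

def pvM (cols : List (List String)) : Nat := (cols.map List.length).foldl max 0

def pvSpec (cols : List (List String)) (m : Nat) : String :=
  ((List.range m).map (pvRowStr cols)).foldr (· ++ ·) ""

lemma pv_cell_shift (i : Nat) (col : List String) : pvCell i col.tail = pvCell (i + 1) col := by
  unfold pvCell
  rcases col with _ | ⟨x, cs⟩
  · simp
  · simp

lemma pv_row_shift (cols : List (List String)) (i : Nat) :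
    pvRowStr (cols.map List.tail) i = pvRowStr cols (i + 1) := by
  unfold pvRowStr
  simp [List.map_map, Function.comp_def, pv_cell_shift]

lemma pv_M_drop (cols : List (List String)) :
    pvM (cols.map List.tail) = pvM cols - 1 := by
  unfold pvM
  have key : ∀ (l : List Nat) (a : Nat),
      (l.map (fun n => n - 1)).foldl max (a - 1) = (l.foldl max a) - 1 := by
    intro l; induction l with
    | nil => intro a; simp
    | cons n t ih =>
      intro a
      simp only [List.map_cons, List.foldl_cons]
      rw [show max (a - 1) (n - 1) = max a n - 1 by omega, ih]
  simpa [List.map_map, Function.comp_def, List.length_tail] using key (cols.map List.length) 0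

lemma pv_M_zero_all (cols : List (List String)) (h : pvM cols = 0) :
    (cols.all (fun c => c.length == 0)) = true := by
  unfold pvM at h
  induction cols with
  | nil => simp
  | cons c t ih =>
    simp only [List.map_cons, List.foldl_cons] at h
    have hle : max 0 c.length ≤ ((t.map List.length).foldl max (max 0 c.length)) :=
      (PySem.List.le_foldl_max (t.map List.length) (max 0 c.length)).1
    have hc : c.length = 0 := by omega
    have ht : (t.map List.length).foldl max 0 = 0 := by
      simpa [hc] using h
    simp [hc, ih ht]

lemma pv_all_M_zero (cols : List (List String))
    (h : (cols.all (fun c => c.length == 0)) = true) : pvM cols = 0 := by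
  unfold pvM
  induction cols with
  | nil => simp
  | cons c t ih =>
    simp only [List.all_cons, Bool.and_eq_true, beq_iff_eq] at h
    simp only [List.map_cons, List.foldl_cons, h.1]
    simpa [pvM] using ih h.2

-- B-side characterisation
lemma pv_loopB_eq (m : Nat) : ∀ (cols : List (List String)) (ret : String), pvM cols = m →
    pvLoopB cols ret = ret ++ pvSpec cols m := by
  induction m with
  | zero =>
    intro cols ret h
    rw [pvLoopB.eq_def]
    have hc : ((cols.map List.head?).all (fun x => x.isNone)) = true := by
      rw [pv_allnone]; exact pv_M_zero_all cols h
    simp only [hc, if_true, pvSpec, List.range_zero, List.map_nil, List.foldr_nil, String.append_empty]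
  | succ n ih =>
    intro cols ret h
    have hall : ¬ (cols.all (fun c => c.length == 0)) = true := by
      intro hc
      have : pvM cols = 0 := pv_all_M_zero cols hc
      omega
    rw [pvLoopB.eq_def]
    have hc : ¬ ((cols.map List.head?).all (fun x => x.isNone)) = true := by
      rw [pv_allnone]; exact hall
    rw [if_neg hc]
    have hm : pvM (cols.map List.tail) = n := by
      rw [pv_M_drop, h]; omega
    rw [ih _ _ hm]
    have hrow : ("<tr>" ++ PySem.Str.join "" ((cols.map List.head?).map (fun x =>
        match x with
        | none => pvBlankPair
        | some color => color_to_td_pair color)) ++ "</tr>") = pvRowStr cols 0 := by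
      unfold pvRowStr
      rw [List.map_map]
      have hmap : cols.map ((fun x =>
          match x with
          | none => pvBlankPair
          | some color => color_to_td_pair color) ∘ List.head?) = cols.map (pvCell 0) := by
        apply List.map_congr_left
        intro col _
        unfold pvCell
        rcases col with _ | ⟨x, cs⟩ <;> simp
      rw [hmap]
    have hspec : pvSpec cols (n + 1) = pvRowStr cols 0 ++ pvSpec (cols.map List.tail) n := by
      unfold pvSpec
      rw [List.range_succ_eq_map]
      simp only [List.map_cons, List.foldr_cons, List.map_map, Function.comp_def]
      exact congrArg (fun l => pvRowStr cols 0 ++ List.foldr (· ++ ·) "" l)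
        (List.map_congr_left (fun i _ => (pv_row_shift cols i).symm))
    rw [hspec, hrow, String.append_assoc]

-- A-side characterisation
lemma pv_foldr_base (l : List String) (b : String) :
    l.foldr (· ++ ·) b = l.foldr (· ++ ·) "" ++ b := by
  induction l with
  | nil => simp
  | cons x t ih => simp only [List.foldr_cons, ih, String.append_assoc]

lemma pv_castfold' (l : List Nat) (a : Nat) :
    (l.map (Nat.cast : Nat → Int)).foldl max ((a : Nat) : Int) = ((l.foldl max a : Nat) : Int) := by
  induction l generalizing a with
  | nil => simp
  | cons n t ih =>
    simp only [List.map_cons, List.foldl_cons]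
    rw [← Nat.cast_max]
    exact ih (max a n)

lemma pv_castfold (l : List (List String)) (a : Nat) :
    (l.map (fun c => PySem.List.len c)).foldl max ((a : Nat) : Int) = (((l.map List.length).foldl max a : Nat) : Int) := by
  have h := pv_castfold' (l.map List.length) a
  simpa [List.map_map, Function.comp_def, PySem.List.len_eq] using h

lemma pv_foldA (cols : List (List String)) (m : Nat) (init : String) :
    (List.range m).foldl (fun ret k => ret ++ ("<tr>" ++ PySem.Str.join "" (cols.map (fun chroma =>
      if ((k : Nat) : Int) < PySem.List.len chroma then color_to_td_pair ((PySem.List.pyGet? chroma ((k : Nat) : Int)).getD "") else pvBlankPair)) ++ "</tr>")) init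
    = init ++ pvSpec cols m := by
  induction m generalizing init with
  | zero => simp [pvSpec]
  | succ n ih =>
    simp only [List.range_succ, List.foldl_append, List.foldl_cons, List.foldl_nil]
    rw [ih]
    have hb : ("<tr>" ++ PySem.Str.join "" (cols.map (fun chroma => if ((n : Nat) : Int) < PySem.List.len chroma then color_to_td_pair ((PySem.List.pyGet? chroma ((n : Nat) : Int)).getD "") else pvBlankPair)) ++ "</tr>") = pvRowStr cols n := by
      unfold pvRowStr
      have hm2 : cols.map (fun chroma => if ((n : Nat) : Int) < PySem.List.len chroma then color_to_td_pair ((PySem.List.pyGet? chroma ((n : Nat) : Int)).getD "") else pvBlankPair) = cols.map (pvCell n) := by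
        apply List.map_congr_left
        intro col _
        unfold pvCell
        simp [PySem.List.len_eq]
      rw [hm2]
    have hs : pvSpec cols (n + 1) = pvSpec cols n ++ pvRowStr cols n := by
      unfold pvSpec
      rw [List.range_succ, List.map_append, List.foldr_append]
      simp only [List.map_cons, List.map_nil, List.foldr_cons, List.foldr_nil]
      rw [pv_foldr_base, String.append_empty]
    rw [hb, hs, String.append_assoc]

lemma pv_A_eq (brightness : List (List String)) (h : brightness ≠ []) :
    brightness_group_to_rows brightness = pvSpec brightness (pvM brightness) := by
  rcases brightness with _ | ⟨b, t⟩
  · exact absurd rfl h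
  have hmax : (t.map (fun c => PySem.List.len c)).foldl max (PySem.List.len b) = ((pvM (b :: t) : Nat) : Int) := by
    have h1 : PySem.List.len b = ((b.length : Nat) : Int) := by simp
    have h2 : pvM (b :: t) = (t.map List.length).foldl max b.length := by
      unfold pvM
      simp
    rw [h1, pv_castfold, h2]
  have hA : brightness_group_to_rows (b :: t) =
      (PySem.List.pyRange 0 ((pvM (b :: t) : Nat) : Int) 1).foldl
        (fun ret i => ret ++ ("<tr>" ++ PySem.Str.join "" ((b :: t).map (fun chroma =>
          if i < PySem.List.len chroma then color_to_td_pair ((PySem.List.pyGet? chroma i).getD "") else pvBlankPair)) ++ "</tr>")) "" := by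
    unfold brightness_group_to_rows
    rw [List.map_cons, PySem.List.max?_id_cons, hmax]
  rw [hA, PySem.List.pyRange_zero_natCast, List.foldl_map]
  exact (pv_foldA (b :: t) (pvM (b :: t)) "").trans (by simp)

-- ===== VERDICT (by name: the statement is the Claim_ definition above) =====
theorem brightness_group_to_rows_spec : Claim_equal_brightness_group_to_rows := by
  intro brightness _ hpre
  unfold Spec_brightness_group_to_rows brightness_group_to_rows_alt
  rw [pv_A_eq brightness hpre, pv_loopB_eq (pvM brightness) brightness "" rfl,
    String.empty_append]

@[simp]
theorem brightness_group_to_rows_raises : Claim_raises_brightness_group_to_rows := by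
  unfold Claim_raises_brightness_group_to_rows
  refine ⟨fun b _ hr hp => hp hr, by decide, rfl, ?_⟩
  show brightness_group_to_rows_alt [] = ""
  unfold brightness_group_to_rows_alt
  rw [pvLoopB.eq_def]
  simp
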